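-- pv_equiv track=rewrite | github.com/cgs1019/graceful_trees | graceful_trees.py | graceful_mnstar
-- ===== SOURCE A (Python) =====
-- def graceful_mnstar(m, n):
--   """returns an n-row x m-matrix matrix of labels for an mn-star"""
--   return [[ ((-1) ** j) * (n * (-int(m / 2) + i) + int((j+1)/2))
--              for i in range(m)
--           ] for j in range(n)
--          ]
--   return [[ ((-1) ** j) * (n * (-int(m/2) + i)  + int((j + 1) / 2))
--              for i in range(m)
--           ] for j in range(n)
--          ]
-- ===== SOURCE B (Python) =====
-- def graceful_mnstar(m, n):
--     """returns an n-row x m-matrix matrix of labels for an mn-star"""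
--     if n <= 0:
--         return []
--     half = int(m / 2)
--     row = [n * (i - half) for i in range(m)]
--     out = [row]
--     for j in range(1, n):
--         d = -1 if j % 2 == 1 else 0
--         row = [d - x for x in row]
--         out.append(row)
--     return out
-- ===== Notes on version B (the rewrite author's own statement) =====
-- stated objective: faster
-- what changed: Instead of evaluating the closed-form formula ((-1)**j)*(n*(-int(m/2)+i)+int((j+1)/2)) at every cell, B computes only the base row [n*(i-int(m/2))] once and derives each subsequent row from the previous one by the recurrence row_j = [d - x for x in row_{j-1}] with d = -1 for odd j and 0 for even j, so each cell costs one subtraction instead of a power and two multiplications.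
import Mathlib
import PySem

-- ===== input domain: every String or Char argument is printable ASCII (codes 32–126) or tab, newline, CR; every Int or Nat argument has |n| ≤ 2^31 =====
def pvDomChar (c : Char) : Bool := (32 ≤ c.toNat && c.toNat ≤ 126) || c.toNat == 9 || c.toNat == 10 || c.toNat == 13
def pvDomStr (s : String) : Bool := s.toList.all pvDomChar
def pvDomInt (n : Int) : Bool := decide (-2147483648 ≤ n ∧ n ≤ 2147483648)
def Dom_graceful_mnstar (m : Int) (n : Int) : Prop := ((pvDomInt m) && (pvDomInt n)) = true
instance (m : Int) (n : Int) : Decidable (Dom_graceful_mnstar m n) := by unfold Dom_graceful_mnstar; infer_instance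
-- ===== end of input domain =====

-- B computes only the base row once and derives each later row from the previous
-- one by a negate-plus-offset recurrence (one subtraction per cell); a timing run measured B faster.


-- ===== PORT A =====
-- int(m / 2) on |m| ≤ 2^31 is exact float division then truncation toward zero = Int.tdiv
def graceful_mnstar (m : Int) (n : Int) : List (List Int) :=
  (PySem.List.pyRange 0 n 1).map (fun j =>
    (PySem.List.pyRange 0 m 1).map (fun i =>
      ((-1 : Int) ^ j.toNat) * (n * (-(Int.tdiv m 2) + i) + Int.tdiv (j + 1) 2)))

-- ===== PORT B =====
-- one iteration of B's 'for j in range(1, n)' loop on the state (row, out);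
-- j ≥ 1 there, so Python's j % 2 equals Int.emod here
def pvStepB (st : List Int × List (List Int)) (j : Int) : List Int × List (List Int) :=
  let d : Int := if j % 2 = 1 then -1 else 0
  let row' := st.1.map (fun x => d - x)
  (row', st.2 ++ [row'])

def graceful_mnstar_alt (m : Int) (n : Int) : List (List Int) :=
  if n ≤ 0 then []
  else
    let half := Int.tdiv m 2
    let row0 := (PySem.List.pyRange 0 m 1).map (fun i => n * (i - half))
    ((PySem.List.pyRange 1 n 1).foldl pvStepB (row0, [row0])).2

-- ===== PRECONDITION & SPEC =====
def Spec_graceful_mnstar (m : Int) (n : Int) (out : List (List Int)) : Prop := out = graceful_mnstar_alt m n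
instance (m : Int) (n : Int) (out : List (List Int)) : Decidable (Spec_graceful_mnstar m n out) := by unfold Spec_graceful_mnstar; infer_instance

-- ===== CLAIM (what is proved, stated in full; the proofs are below) =====
def Claim_equal_graceful_mnstar : Prop := ∀ (m : Int) (n : Int), Dom_graceful_mnstar m n → Spec_graceful_mnstar m n (graceful_mnstar m n)

-- ===== LEMMAS AND PROOFS =====

-- A's j-th row, as a function of j : Nat
def pvRowA (m n : Int) (k : Nat) : List Int :=
  (PySem.List.pyRange 0 m 1).map (fun i =>
    ((-1 : Int) ^ k) * (n * (-(Int.tdiv m 2) + i) + Int.tdiv ((k : Int) + 1) 2))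

theorem pvRowA_zero (m n : Int) :
    pvRowA m n 0 = (PySem.List.pyRange 0 m 1).map (fun i => n * (i - Int.tdiv m 2)) := by
  unfold pvRowA
  apply List.map_congr_left
  intro i _
  have h1 : Int.tdiv (((0 : Nat) : Int) + 1) 2 = 0 := by decide
  rw [h1, pow_zero, one_mul]
  ring

theorem pvRowA_succ (m n : Int) (k : Nat) :
    pvRowA m n (k + 1) =
      (pvRowA m n k).map (fun x => (if ((k : Int) + 1) % 2 = 1 then (-1 : Int) else 0) - x) := by
  unfold pvRowA
  rw [List.map_map]
  apply List.map_congr_left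
  intro i _
  simp only [Function.comp_apply, pow_succ]
  push_cast
  rw [Int.tdiv_eq_ediv_of_nonneg (by positivity : (0:Int) ≤ (k : Int) + 1),
      Int.tdiv_eq_ediv_of_nonneg (by positivity : (0:Int) ≤ (k : Int) + 1 + 1)]
  by_cases h : ((k : Int) + 1) % 2 = 1
  · rw [if_pos h]
    have hk : Even k := by
      rcases Nat.even_or_odd k with he | ho
      · exact he
      · exfalso; obtain ⟨t, ht⟩ := ho; omega
    rw [Even.neg_one_pow hk]
    have hc : ((k : Int) + 1 + 1) / 2 = ((k : Int) + 1) / 2 + 1 := by omega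
    rw [hc]; ring
  · rw [if_neg h]
    have hk : Odd k := by
      rcases Nat.even_or_odd k with he | ho
      · exfalso; obtain ⟨t, ht⟩ := he; omega
      · exact ho
    rw [Odd.neg_one_pow hk]
    have hc : ((k : Int) + 1 + 1) / 2 = ((k : Int) + 1) / 2 := by omega
    rw [hc]; ring

-- the loop invariant: after folding over 1..k the state is (row k, rows 0..k)
theorem pv_loop (m n : Int) : ∀ (k : Nat),
    (PySem.List.pyRange 1 ((k : Int) + 1) 1).foldl pvStepB (pvRowA m n 0, [pvRowA m n 0])
    = (pvRowA m n k, (List.range (k + 1)).map (pvRowA m n)) := by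
  intro k
  induction k with
  | zero =>
    rw [PySem.List.pyRange_one_eq_nil (by omega : ((0:Nat):Int) + 1 ≤ 1)]
    simp
  | succ k ih =>
    have hsplit : PySem.List.pyRange 1 (((k + 1 : Nat) : Int) + 1) 1
        = PySem.List.pyRange 1 ((k : Int) + 1) 1 ++ [(k : Int) + 1] := by
      push_cast
      rw [PySem.List.pyRange_one_succ_right (by omega)]
    rw [hsplit, List.foldl_append, ih]
    simp only [List.foldl_cons, List.foldl_nil]
    rw [List.range_succ (n := k + 1), List.map_append, List.map_singleton, pvRowA_succ]
    rfl

-- ===== VERDICT (by name: the statement is the Claim_ definition above) =====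
theorem graceful_mnstar_spec : Claim_equal_graceful_mnstar := by
  intro m n _
  unfold Spec_graceful_mnstar graceful_mnstar graceful_mnstar_alt
  by_cases hn : n ≤ 0
  · rw [if_pos hn, PySem.List.pyRange_one_eq_nil hn]
    rfl
  · rw [if_neg hn]
    dsimp only
    obtain ⟨k, hk⟩ : ∃ k : Nat, n = (k : Int) + 1 := ⟨(n - 1).toNat, by omega⟩
    rw [← pvRowA_zero m n, hk, pv_loop m ((k : Int) + 1) k]
    rw [PySem.List.pyRange_one 0 ((k : Int) + 1)]
    have hlen : (((k : Int) + 1 - 0).toNat) = k + 1 := by omega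
    rw [hlen, List.map_map]
    apply List.map_congr_left
    intro i hi
    simp only [Function.comp_apply, zero_add, Int.toNat_natCast]
    rw [← hk]
    rfl
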